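-- pv_equiv track=rewrite | github.com/trhariharasudhan/GrandpaAssistant | core/command_router.py | _resolve_contact_choice_command
-- ===== SOURCE A (Python) =====
-- def _resolve_contact_choice_command(command, options):
--     normalized = " ".join((command or "").lower().strip().split())
--     index_map = {
--         "1": 0,
--         "one": 0,
--         "first": 0,
--         "first one": 0,
--         "2": 1,
--         "two": 1,
--         "second": 1,
--         "second one": 1,
--         "3": 2,
--         "three": 2,
--         "third": 2,
--         "third one": 2,
--     }
--     if normalized in index_map and index_map[normalized] < len(options):
--         return options[index_map[normalized]]
--     for option in options:
--         if normalized == " ".join(option.lower().split()):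
--             return option
--     return None
-- ===== SOURCE B (Python) =====
-- def _resolve_contact_choice_command(command, options):
--     normalized = " ".join((command or "").lower().strip().split())
--     index_map = {
--         "1": 0,
--         "one": 0,
--         "first": 0,
--         "first one": 0,
--         "2": 1,
--         "two": 1,
--         "second": 1,
--         "second one": 1,
--         "3": 2,
--         "three": 2,
--         "third": 2,
--         "third one": 2,
--     }
--     # Build one lookup table: option-text entries first (first occurrence wins),
--     # then overlay valid aliases so they take precedence; answer with one get().
--     table = {}
--     for option in options:
--         key = " ".join(option.lower().split())
--         if key not in table:
--             table[key] = option
--     for alias, idx in index_map.items():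
--         if idx < len(options):
--             table[alias] = options[idx]
--     return table.get(normalized)
-- ===== Notes on version B (the rewrite author's own statement) =====
-- stated objective: alternative
-- what changed: Replaces the alias-dict check followed by a linear scan over options by building one combined lookup table (first-occurrence option-text entries, then valid aliases overlaid so they take precedence) answered with a single dict get().
import Mathlib
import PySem

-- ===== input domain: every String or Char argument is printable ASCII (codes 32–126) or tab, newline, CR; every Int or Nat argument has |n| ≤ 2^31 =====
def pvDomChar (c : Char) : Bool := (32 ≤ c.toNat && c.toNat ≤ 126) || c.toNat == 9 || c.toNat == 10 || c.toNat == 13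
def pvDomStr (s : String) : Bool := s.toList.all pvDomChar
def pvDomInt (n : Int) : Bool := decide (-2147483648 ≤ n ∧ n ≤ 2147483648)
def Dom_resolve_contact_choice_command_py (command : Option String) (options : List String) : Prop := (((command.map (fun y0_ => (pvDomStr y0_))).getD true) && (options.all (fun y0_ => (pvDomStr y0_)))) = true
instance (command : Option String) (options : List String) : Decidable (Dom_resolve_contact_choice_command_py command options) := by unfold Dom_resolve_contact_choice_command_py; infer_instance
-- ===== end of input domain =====

-- B builds one combined lookup table (option-text entries first-wins, then valid aliases overlaid) and answers with a single get, instead of A's alias-dict check plus linear scan.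

-- normalization of the command: " ".join((command or "").lower().strip().split())
def pvNormCmd (s : String) : String :=
  PySem.Str.join " " (PySem.Str.split₀ (PySem.Str.strip (PySem.Str.lower s)))

-- normalization of an option: " ".join(option.lower().split())
def pvNormOpt (s : String) : String :=
  PySem.Str.join " " (PySem.Str.split₀ (PySem.Str.lower s))

-- the dict literal index_map (distinct keys, so the literal IS this items list)
def pvIndexMap : PySem.Dict String Int :=
  PySem.Dict.mk [("1", 0), ("one", 0), ("first", 0), ("first one", 0),
                 ("2", 1), ("two", 1), ("second", 1), ("second one", 1),
                 ("3", 2), ("three", 2), ("third", 2), ("third one", 2)]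

-- ===== PORT A =====
def resolve_contact_choice_command_py (command : Option String) (options : List String) : Option String :=
  let normalized := pvNormCmd (command.getD "")
  match pvIndexMap.get? normalized with
  | some idx =>
      if idx < (options.length : Int) then PySem.List.pyGet? options idx
      else options.find? (fun option => normalized == pvNormOpt option)
  | none => options.find? (fun option => normalized == pvNormOpt option)

-- ===== PORT B =====
def resolve_contact_choice_command_py_alt (command : Option String) (options : List String) : Option String :=
  let normalized := pvNormCmd (command.getD "")
  let table : PySem.Dict String String :=
    options.foldl (fun t option =>
      let key := pvNormOpt option
      if t.contains key then t else t.insert key option) PySem.Dict.empty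
  let table2 :=
    pvIndexMap.items.foldl (fun t p =>
      if p.2 < (options.length : Int) then t.insert p.1 (PySem.List.pyGetD options p.2 "") else t) table
  table2.get? normalized

-- ===== PRECONDITION & SPEC =====
def Spec_resolve_contact_choice_command_py (command : Option String) (options : List String) (out : Option String) : Prop := out = resolve_contact_choice_command_py_alt command options
instance (command : Option String) (options : List String) (out : Option String) : Decidable (Spec_resolve_contact_choice_command_py command options out) := by unfold Spec_resolve_contact_choice_command_py; infer_instance

-- ===== CLAIM (what is proved, stated in full; the proofs are below) =====
def Claim_equal_resolve_contact_choice_command_py : Prop := ∀ (command : Option String) (options : List String), Dom_resolve_contact_choice_command_py command options → Spec_resolve_contact_choice_command_py command options (resolve_contact_choice_command_py command options)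

-- ===== LEMMAS AND PROOFS =====

-- the first-wins table build answers lookups like "t first, else first match in the list"
lemma pv_table_get? (opts : List String) (t : PySem.Dict String String) (k : String) :
    (opts.foldl (fun t option =>
      let key := pvNormOpt option
      if t.contains key then t else t.insert key option) t).get? k
    = (t.get? k).or (opts.find? (fun option => k == pvNormOpt option)) := by
  induction opts generalizing t with
  | nil => simp
  | cons o rest ih =>
    simp only [List.foldl_cons, List.find?]
    by_cases hk : k = pvNormOpt o
    · subst hk
      by_cases hc : t.contains (pvNormOpt o)
      · rw [if_pos hc, ih]
        have hs : (t.get? (pvNormOpt o)).isSome := by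
          rw [← PySem.Dict.contains_eq_isSome_get?]; exact hc
        obtain ⟨v, hv⟩ := Option.isSome_iff_exists.mp hs
        simp [hv]
      · rw [if_neg hc, ih, PySem.Dict.get?_insert_self]
        have hn : t.get? (pvNormOpt o) = none := by
          have h2 := PySem.Dict.contains_eq_isSome_get? (d := t) (k := pvNormOpt o)
          rw [h2] at hc
          exact Option.not_isSome_iff_eq_none.mp (by simpa using hc)
        simp [hn]
    · have hb : (k == pvNormOpt o) = false := by simp [hk]
      by_cases hc : t.contains (pvNormOpt o)
      · rw [if_pos hc, ih]; simp [hb]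
      · rw [if_neg hc, ih, PySem.Dict.get?_insert]
        simp [hb, hk]

-- overlaying a Nodup-keyed pair list with a guarded insert loop answers lookups
-- like "the (unique) matching overlaid entry if its guard holds, else the base table"
lemma pv_overlay_get? (ps : List (String × Int)) (hnd : (ps.map Prod.fst).Nodup)
    (P : Int → Prop) [DecidablePred P] (f : Int → String)
    (t : PySem.Dict String String) (n : String) :
    (ps.foldl (fun t p => if P p.2 then t.insert p.1 (f p.2) else t) t).get? n
    = (match (PySem.Dict.mk ps).get? n with
       | some idx => if P idx then some (f idx) else t.get? n
       | none => t.get? n) := by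
  induction ps generalizing t with
  | nil => simp [PySem.Dict.get?]
  | cons p ps ih =>
    obtain ⟨k, v⟩ := p
    simp only [List.map_cons, List.nodup_cons] at hnd
    obtain ⟨hk, hnd'⟩ := hnd
    rw [List.foldl_cons, ih hnd', PySem.Dict.get?_mk_cons]
    by_cases hkn : k = n
    · subst hkn
      have hnone : (PySem.Dict.mk ps).get? k = none := by
        rw [PySem.Dict.get?_eq_none_iff_not_mem_keys]
        simpa [PySem.Dict.keys] using hk
      by_cases hp : P v
      · simp [hp, hnone, PySem.Dict.get?_insert_self]
      · simp [hp, hnone]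
    · have hb : (k == n) = false := by simp [hkn]
      rw [hb]
      by_cases hp : P v
      · simp only [if_pos hp]
        cases hg : (PySem.Dict.mk ps).get? n with
        | none => simp [PySem.Dict.get?_insert, Ne.symm hkn]
        | some idx => simp [PySem.Dict.get?_insert, Ne.symm hkn]
      · simp [hp]

-- every value stored in index_map is in range as a nonnegative index
lemma pv_indexMap_val_nonneg (n : String) (idx : Int) (h : pvIndexMap.get? n = some idx) :
    0 ≤ idx := by
  have hm := PySem.Dict.mem_items_of_get?_eq_some (h := h)
  simp [pvIndexMap] at hm
  rcases hm with ⟨_,h⟩|⟨_,h⟩|⟨_,h⟩|⟨_,h⟩|⟨_,h⟩|⟨_,h⟩|⟨_,h⟩|⟨_,h⟩|⟨_,h⟩|⟨_,h⟩|⟨_,h⟩|⟨_,h⟩ <;> omega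

-- options[idx] agrees with some(options[idx] read with a default) when in range
lemma pv_pyGet?_eq_some_pyGetD (xs : List String) (i : Int) (h0 : 0 ≤ i)
    (h : i < (xs.length : Int)) :
    PySem.List.pyGet? xs i = some (PySem.List.pyGetD xs i "") := by
  have h1 := PySem.List.pyGet?_of_nonneg (xs := xs) h0
  have hlt : i.toNat < xs.length := by omega
  rw [h1]
  simp [PySem.List.pyGetD, h1, List.getElem?_eq_getElem hlt]

-- ===== VERDICT (by name: the statement is the Claim_ definition above) =====
theorem resolve_contact_choice_command_py_spec : Claim_equal_resolve_contact_choice_command_py := by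
  intro command options _
  unfold Spec_resolve_contact_choice_command_py
  simp only [resolve_contact_choice_command_py, resolve_contact_choice_command_py_alt]
  rw [pv_overlay_get? pvIndexMap.items (by decide)
        (fun v => v < (options.length : Int)) (fun v => PySem.List.pyGetD options v "")]
  rw [pv_table_get?]
  simp only [PySem.Dict.get?_empty, Option.none_or]
  cases hg : pvIndexMap.get? (pvNormCmd (command.getD "")) with
  | none => rfl
  | some idx =>
    by_cases hlt : idx < (options.length : Int)
    · simp only [if_pos hlt]
      exact pv_pyGet?_eq_some_pyGetD options idx (pv_indexMap_val_nonneg _ _ hg) hlt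
    · simp [hlt]
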